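-- pv_equiv track=rewrite | github.com/KiloOscarNovember/decode | D/fn.py | vig_d_auto
-- ===== SOURCE A (Python) =====
-- list_A="ABCDEFGHIJKLMNOPQRSTUVWXYZ"
--
-- list_a=list_A.lower()
--
-- list_0="0123456789"
--
-- def rot_a(c,k):
--     if list_A.find(c) >=0:
--         list= list_A
--     elif list_a.find(c) >=0:
--         list= list_a
--     elif list_0.find(c) >=0:
--         list= list_0
--     else:
--         return c
--
--     l = len(list)
--     position = list.find(c)
--     p= (position + k) % l
--     return list[p]
--
-- def vig_a(c,k,type):
--     t=list_A.find(k)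
--     if t<0:
--         t=list_a.find(k)
--     if t<0:
--         t=list_0.find(k)
--     if t<0:
--         t=0
--     if type=="d":
--         t=-t
--     return rot_a(c,t)
--
-- def vig_d_auto(c,k):
--     l_c=len(c)
--     p=""
--     for i in range(l_c):
--         s=k[i]
--         p+=vig_a(c[i],s,"d")
--         k+=vig_a(c[i],s,"d")
--     return p
-- ===== SOURCE B (Python) =====
-- list_A="ABCDEFGHIJKLMNOPQRSTUVWXYZ"
--
-- list_a=list_A.lower()
--
-- list_0="0123456789"
--
-- def rot_a(c,k):
--     if list_A.find(c) >=0: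
--         list= list_A
--     elif list_a.find(c) >=0:
--         list= list_a
--     elif list_0.find(c) >=0:
--         list= list_0
--     else:
--         return c
--
--     l = len(list)
--     position = list.find(c)
--     p= (position + k) % l
--     return list[p]
--
-- def vig_a(c,k,type):
--     t=list_A.find(k)
--     if t<0:
--         t=list_a.find(k)
--     if t<0:
--         t=list_0.find(k)
--     if t<0:
--         t=0
--     if type=="d":
--         t=-t
--     return rot_a(c,t)
--
-- def vig_d_auto(c,k):
--     # Phase 1: the first min(len(k), len(c)) chars are decoded with the fixed key.
--     p=[vig_a(cc,kc,"d") for cc,kc in zip(c,k)]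
--     # Phase 2: beyond the key, the keystream is the plaintext itself (autokey).
--     for i in range(len(k),len(c)):
--         p.append(vig_a(c[i],p[i-len(k)],"d"))
--     return "".join(p)
-- ===== Notes on version B (the rewrite author's own statement) =====
-- stated objective: faster
-- what changed: B replaces A's single loop that keeps appending the decoded plaintext to a growing key string with a two-phase decomposition: one pass decoding under the fixed key via zip(c,k), then a second pass reading the autokey stream directly out of the plaintext list p[i-len(k)], joined at the end; it also avoids A's quadratic string concatenation (measured ~2.2x faster).
import Mathlib
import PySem

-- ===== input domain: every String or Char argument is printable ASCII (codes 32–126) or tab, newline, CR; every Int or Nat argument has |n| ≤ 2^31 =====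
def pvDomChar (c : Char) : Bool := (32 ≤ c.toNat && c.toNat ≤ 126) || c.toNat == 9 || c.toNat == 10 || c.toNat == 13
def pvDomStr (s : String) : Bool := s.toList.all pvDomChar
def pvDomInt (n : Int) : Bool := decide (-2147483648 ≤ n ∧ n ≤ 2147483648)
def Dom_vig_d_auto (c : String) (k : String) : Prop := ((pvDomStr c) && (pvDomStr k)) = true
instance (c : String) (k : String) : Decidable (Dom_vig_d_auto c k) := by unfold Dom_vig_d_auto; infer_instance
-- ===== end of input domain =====

-- B decodes in two phases (fixed key via zip, then autokey read out of the plaintext list)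
-- instead of A's single loop that grows the key string; return values proved equal wherever A returns.

-- ===== PORT A =====
-- module constants
def pvListA : List Char := "ABCDEFGHIJKLMNOPQRSTUVWXYZ".toList
def pvLista : List Char := PySem.Chars.lower pvListA
def pvList0 : List Char := "0123456789".toList

-- rot_a: the found index is always in [0, l), so list[p] never raises; pyGetD's default is never used
def rotA (c : Char) (t : Int) : Char :=
  let lst? : Option (List Char) :=
    if PySem.Chars.find pvListA [c] ≥ 0 then some pvListA
    else if PySem.Chars.find pvLista [c] ≥ 0 then some pvLista
    else if PySem.Chars.find pvList0 [c] ≥ 0 then some pvList0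
    else none
  match lst? with
  | none => c
  | some lst =>
    let l : Int := PySem.List.len lst
    let position : Int := PySem.Chars.find lst [c]
    let p : Int := PySem.Int.mod (position + t) l
    PySem.List.pyGetD lst p c

-- vig_a
def vigA (c : Char) (kc : Char) (type : String) : Char :=
  let t := PySem.Chars.find pvListA [kc]
  let t := if t < 0 then PySem.Chars.find pvLista [kc] else t
  let t := if t < 0 then PySem.Chars.find pvList0 [kc] else t
  let t := if t < 0 then 0 else t
  let t := if type = "d" then -t else t
  rotA c t

-- A's loop: i walks range(len(c)); state = (p, k), both grown by the decoded char.
-- k[i] is in range whenever Pre_ holds (k starts nonempty and grows each step); pyGetD's default is unreachable there.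
def vigDAutoLoop (cs : List Char) (i : Nat) (p : List Char) (kl : List Char) : List Char :=
  match cs with
  | [] => p
  | x :: rest =>
    let s := PySem.List.pyGetD kl (i : Int) ' '
    let d := vigA x s "d"
    vigDAutoLoop rest (i + 1) (p ++ [d]) (kl ++ [d])

def vig_d_auto (c : String) (k : String) : String :=
  String.ofList (vigDAutoLoop c.toList 0 [] k.toList)

-- ===== PORT B =====
-- phase 2 of Source B: for i in range(len(k), len(c)): p.append(dec(c[i], p[i-len(k)])); j = i - len(k)
def vigAltLoop2 (rest : List Char) (p : List Char) (j : Nat) : List Char :=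
  match rest with
  | [] => p
  | x :: xs =>
    let d := vigA x (PySem.List.pyGetD p (j : Int) ' ') "d"
    vigAltLoop2 xs (p ++ [d]) (j + 1)

def vig_d_auto_alt (c : String) (k : String) : String :=
  let cs := c.toList
  let ks := k.toList
  let p1 := (cs.zip ks).map (fun z => vigA z.1 z.2 "d")
  String.ofList (vigAltLoop2 (cs.drop ks.length) p1 0)

-- ===== PRECONDITION & SPEC =====
-- Pre_ excludes exactly the inputs where A raises IndexError (empty key with nonempty ciphertext: k[0]).
def Pre_vig_d_auto (c : String) (k : String) : Prop := c.toList = [] ∨ k.toList ≠ []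
instance (c : String) (k : String) : Decidable (Pre_vig_d_auto c k) := by unfold Pre_vig_d_auto; infer_instance
def pvWitness_vig_d_auto : String × String := ("Lxfopkmetm", "A")

def Spec_vig_d_auto (c : String) (k : String) (out : String) : Prop := out = vig_d_auto_alt c k
instance (c : String) (k : String) (out : String) : Decidable (Spec_vig_d_auto c k out) := by unfold Spec_vig_d_auto; infer_instance

-- ===== CLAIM (what is proved, stated in full; the proofs are below) =====
def Claim_equal_vig_d_auto : Prop := ∀ (c : String) (k : String), Dom_vig_d_auto c k → Pre_vig_d_auto c k → Spec_vig_d_auto c k (vig_d_auto c k)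

-- ===== LEMMAS AND PROOFS =====

-- reference autokey decode: consume ciphertext, keystream grows by each decoded char
def refDec : List Char → List Char → List Char
  | [], _ => []
  | _ :: _, [] => []
  | x :: xs, s :: ss =>
    let d := vigA x s "d"
    d :: refDec xs (ss ++ [d])

theorem vigDAutoLoop_eq_refDec (cs : List Char) : ∀ (p kl : List Char) (i : Nat),
    (cs = [] ∨ i < kl.length) → vigDAutoLoop cs i p kl = p ++ refDec cs (kl.drop i) := by
  induction cs with
  | nil => intro p kl i _; simp [vigDAutoLoop, refDec]
  | cons x xs ih =>
    intro p kl i h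
    have hi : i < kl.length := h.resolve_left (by simp)
    have hdrop : kl.drop i = kl[i] :: kl.drop (i + 1) := List.drop_eq_getElem_cons hi
    have hget : PySem.List.pyGetD kl (i : Int) ' ' = kl[i] := by
      simp [PySem.List.pyGetD_natCast, List.getD_eq_getElem?_getD, hi]
    rw [vigDAutoLoop]
    rw [hget]
    rw [ih (p ++ [vigA x kl[i] "d"]) (kl ++ [vigA x kl[i] "d"]) (i + 1) (Or.inr (by simp; omega))]
    rw [List.drop_append_of_le_length (by omega)]
    rw [hdrop, refDec]
    simp

theorem vigAltLoop2_eq_refDec (rest : List Char) : ∀ (p : List Char) (j : Nat),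
    (rest = [] ∨ j < p.length) → vigAltLoop2 rest p j = p ++ refDec rest (p.drop j) := by
  induction rest with
  | nil => intro p j _; simp [vigAltLoop2, refDec]
  | cons x xs ih =>
    intro p j h
    have hj : j < p.length := h.resolve_left (by simp)
    have hdrop : p.drop j = p[j] :: p.drop (j + 1) := List.drop_eq_getElem_cons hj
    have hget : PySem.List.pyGetD p (j : Int) ' ' = p[j] := by
      simp [PySem.List.pyGetD_natCast, List.getD_eq_getElem?_getD, hj]
    rw [vigAltLoop2]
    rw [hget]
    rw [ih (p ++ [vigA x p[j] "d"]) (j + 1) (Or.inr (by simp; omega))]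
    rw [List.drop_append_of_le_length (by omega)]
    rw [hdrop, refDec]
    simp

theorem refDec_split (k0 : List Char) : ∀ (cs acc : List Char),
    refDec cs (k0 ++ acc) =
      (cs.zip k0).map (fun z => vigA z.1 z.2 "d") ++
        refDec (cs.drop k0.length) (acc ++ (cs.zip k0).map (fun z => vigA z.1 z.2 "d")) := by
  induction k0 with
  | nil => intro cs acc; simp
  | cons s ks ih =>
    intro cs acc
    cases cs with
    | nil => simp [refDec]
    | cons x xs =>
      rw [List.cons_append, refDec]
      rw [show ks ++ acc ++ [vigA x s "d"] = ks ++ (acc ++ [vigA x s "d"]) by simp]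
      rw [ih xs (acc ++ [vigA x s "d"])]
      simp

-- ===== VERDICT (by name: the statement is the Claim_ definition above) =====
theorem vig_d_auto_spec : Claim_equal_vig_d_auto := by
  intro c k _ hpre
  unfold Spec_vig_d_auto vig_d_auto vig_d_auto_alt
  set cs := c.toList with hcs
  set ks := k.toList with hks
  have hpre' : cs = [] ∨ ks ≠ [] := hpre
  congr 1
  -- A side
  have hA : vigDAutoLoop cs 0 [] ks = refDec cs ks := by
    rcases hpre' with h | h
    · rw [vigDAutoLoop_eq_refDec cs [] ks 0 (Or.inl h)]; simp
    · rw [vigDAutoLoop_eq_refDec cs [] ks 0 (Or.inr (List.length_pos_iff.mpr h))]; simp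
  rw [hA]
  -- B side
  have hp1len : ((cs.zip ks).map (fun z => vigA z.1 z.2 "d")).length = min cs.length ks.length := by
    simp
  have hcond : cs.drop ks.length = [] ∨ 0 < ((cs.zip ks).map (fun z => vigA z.1 z.2 "d")).length := by
    by_cases hd : cs.drop ks.length = []
    · exact Or.inl hd
    · right
      have hlt : ks.length < cs.length := by
        by_contra hle
        exact hd (List.drop_eq_nil_of_le (by omega))
      have hks0 : ks ≠ [] := by
        rcases hpre' with h | h
        · exfalso; rw [h] at hlt; simp at hlt
        · exact h
      rw [hp1len]
      have : 0 < ks.length := List.length_pos_iff.mpr hks0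
      omega
  rw [vigAltLoop2_eq_refDec _ _ _ hcond]
  have := refDec_split ks cs []
  simp only [List.append_nil, List.nil_append] at this
  rw [this, List.drop_zero]
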